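-- pv_equiv track=rewrite | github.com/NoahSinclair97/WeatherScraper | plot_operations.py | reorder_data
-- ===== SOURCE A (Python) =====
-- def reorder_data(data):
--   """
--   Reorders the data per month to be plotted
--   """
--   jan = []
--   feb = []
--   mar = []
--   apr = []
--   may = []
--   jun = []
--   jul = []
--   aug = []
--   sep = []
--   oct = []
--   nov = []
--   dec = []
--
--   # Iterates over the data and puts it in to its own month
--   for i in data:
--     if i[0][5:7] == "01":
--       jan.append(i[1])
--     if i[0][5:7] == "02":
--       feb.append(i[1])
--     if i[0][5:7] == "03":
--       mar.append(i[1])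
--     if i[0][5:7] == "04":
--       apr.append(i[1])
--     if i[0][5:7] == "05":
--       may.append(i[1])
--     if i[0][5:7] == "06":
--       jun.append(i[1])
--     if i[0][5:7] == "07":
--       jul.append(i[1])
--     if i[0][5:7] == "08":
--       aug.append(i[1])
--     if i[0][5:7] == "09":
--       sep.append(i[1])
--     if i[0][5:7] == "10":
--       oct.append(i[1])
--     if i[0][5:7] == "11":
--       nov.append(i[1])
--     if i[0][5:7] == "12":
--       dec.append(i[1])
--   finalData = [jan, feb, mar, apr, may, jun, jul, aug, sep, oct, nov, dec]
--
--   return finalData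
-- ===== SOURCE B (Python) =====
-- def reorder_data(data):
--   """
--   Reorders the data per month to be plotted
--   """
--   months = ("01", "02", "03", "04", "05", "06",
--             "07", "08", "09", "10", "11", "12")
--   return [[i[1] for i in data if i[0][5:7] == m] for m in months]
-- ===== Notes on version B (the rewrite author's own statement) =====
-- stated objective: idiomatic
-- what changed: Replaces the single pass maintaining 12 named accumulator lists with 12 branches by a nested comprehension: one filter-scan of the data per fixed month code.
import Mathlib
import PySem

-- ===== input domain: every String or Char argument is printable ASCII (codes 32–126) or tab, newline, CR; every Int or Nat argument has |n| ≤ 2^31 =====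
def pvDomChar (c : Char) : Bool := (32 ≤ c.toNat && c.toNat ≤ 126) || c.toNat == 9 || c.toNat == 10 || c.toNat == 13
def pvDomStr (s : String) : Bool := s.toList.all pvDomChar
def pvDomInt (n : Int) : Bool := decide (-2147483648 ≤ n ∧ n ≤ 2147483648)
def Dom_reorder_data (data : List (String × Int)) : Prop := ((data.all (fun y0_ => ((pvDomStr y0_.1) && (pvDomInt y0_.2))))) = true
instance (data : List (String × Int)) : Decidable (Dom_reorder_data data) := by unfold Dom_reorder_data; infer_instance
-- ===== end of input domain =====

-- B is an idiomatic re-decomposition: a nested comprehension (one filter-scan per fixed month code)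
-- instead of A's single pass maintaining 12 named accumulators with 12 if-branches. Return values proved equal.

-- ===== PORT A =====
-- i[0][5:7] as a character list (exact Python slice semantics via PySem)
def monthSlice (s : String) : List Char := PySem.List.slice s.toList (some 5) (some 7)

-- the loop of A: one pass, 12 accumulator lists, 12 independent if-branches
def reorder_data_loop (data : List (String × Int))
    (jan feb mar apr may jun jul aug sep oct nov dec : List Int) : List (List Int) :=
  match data with
  | [] => [jan, feb, mar, apr, may, jun, jul, aug, sep, oct, nov, dec]
  | i :: rest =>
    reorder_data_loop rest
      (if monthSlice i.1 == "01".toList then jan ++ [i.2] else jan)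
      (if monthSlice i.1 == "02".toList then feb ++ [i.2] else feb)
      (if monthSlice i.1 == "03".toList then mar ++ [i.2] else mar)
      (if monthSlice i.1 == "04".toList then apr ++ [i.2] else apr)
      (if monthSlice i.1 == "05".toList then may ++ [i.2] else may)
      (if monthSlice i.1 == "06".toList then jun ++ [i.2] else jun)
      (if monthSlice i.1 == "07".toList then jul ++ [i.2] else jul)
      (if monthSlice i.1 == "08".toList then aug ++ [i.2] else aug)
      (if monthSlice i.1 == "09".toList then sep ++ [i.2] else sep)
      (if monthSlice i.1 == "10".toList then oct ++ [i.2] else oct)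
      (if monthSlice i.1 == "11".toList then nov ++ [i.2] else nov)
      (if monthSlice i.1 == "12".toList then dec ++ [i.2] else dec)

def reorder_data (data : List (String × Int)) : List (List Int) :=
  reorder_data_loop data [] [] [] [] [] [] [] [] [] [] [] []

-- ===== PORT B =====
def monthCodes : List String :=
  ["01", "02", "03", "04", "05", "06", "07", "08", "09", "10", "11", "12"]

def reorder_data_alt (data : List (String × Int)) : List (List Int) :=
  monthCodes.map (fun m => (data.filter (fun i => monthSlice i.1 == m.toList)).map (fun i => i.2))

-- ===== PRECONDITION & SPEC =====
def Spec_reorder_data (data : List (String × Int)) (out : List (List Int)) : Prop := out = reorder_data_alt data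
instance (data : List (String × Int)) (out : List (List Int)) : Decidable (Spec_reorder_data data out) := by unfold Spec_reorder_data; infer_instance

-- ===== CLAIM (what is proved, stated in full; the proofs are below) =====
def Claim_equal_reorder_data : Prop := ∀ (data : List (String × Int)), Dom_reorder_data data → Spec_reorder_data data (reorder_data data)

-- ===== LEMMAS AND PROOFS =====
def bucket (m : String) (data : List (String × Int)) : List Int :=
  (data.filter (fun i => monthSlice i.1 == m.toList)).map (fun i => i.2)

theorem app_if (c : Prop) [Decidable c] (j : List Int) (v : Int) (x : List Int) :
    (if c then j ++ [v] else j) ++ x = j ++ (if c then v :: x else x) := by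
  split <;> simp

theorem bucket_cons (m : String) (i : String × Int) (rest : List (String × Int)) :
    bucket m (i :: rest) =
      if monthSlice i.1 == m.toList then i.2 :: bucket m rest else bucket m rest := by
  simp only [bucket, List.filter_cons]
  split <;> simp_all

theorem loop_eq (data : List (String × Int)) :
    ∀ jan feb mar apr may jun jul aug sep oct nov dec : List Int,
    reorder_data_loop data jan feb mar apr may jun jul aug sep oct nov dec =
      [jan ++ bucket "01" data, feb ++ bucket "02" data, mar ++ bucket "03" data,
       apr ++ bucket "04" data, may ++ bucket "05" data, jun ++ bucket "06" data,
       jul ++ bucket "07" data, aug ++ bucket "08" data, sep ++ bucket "09" data,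
       oct ++ bucket "10" data, nov ++ bucket "11" data, dec ++ bucket "12" data] := by
  induction data with
  | nil => intro jan feb mar apr may jun jul aug sep oct nov dec; simp [reorder_data_loop, bucket]
  | cons i rest ih =>
    intro jan feb mar apr may jun jul aug sep oct nov dec
    simp only [reorder_data_loop, ih, bucket_cons]
    simp only [← app_if]

-- ===== VERDICT (by name: the statement is the Claim_ definition above) =====
theorem reorder_data_spec : Claim_equal_reorder_data := by
  intro data _
  unfold Spec_reorder_data reorder_data reorder_data_alt monthCodes
  rw [loop_eq]
  simp [bucket]
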